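-- pv_equiv track=rewrite | github.com/speedcuberayush/KRG-winning-camp | DSA/session 3/05ArrayManipulation.py | rearrange_array
-- ===== SOURCE A (Python) =====
-- def rearrange_array(arr):
--     n = len(arr)
--     arr.sort()
--
--     result = [0] * n
--     odd_idx = 0
--     even_idx = 1
--
--     for i in range(0, n, 2):
--         result[i] = arr[odd_idx]
--         odd_idx += 1
--
--     for i in range(1, n, 2):
--         result[i] = arr[-even_idx]
--         even_idx += 1
--
--     return result
-- ===== SOURCE B (Python) =====
-- def rearrange_array(arr):
--     arr.sort()  # same in-place sort as A (observable mutation preserved)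
--     k = (len(arr) + 1) // 2
--     lows = arr[:k]
--     highs = arr[k:][::-1]
--     out = []
--     for i in range(k):
--         out.append(lows[i])
--         if i < len(highs):
--             out.append(highs[i])
--     return out
-- ===== Notes on version B (the rewrite author's own statement) =====
-- stated objective: alternative
-- what changed: A preallocates a zero-filled result and fills even and odd positions in two separate parity-indexed passes with two running counters and a negative index; B partitions the sorted array into lows and reversed highs and builds the result front-to-back in one interleaving pass.
import Mathlib
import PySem

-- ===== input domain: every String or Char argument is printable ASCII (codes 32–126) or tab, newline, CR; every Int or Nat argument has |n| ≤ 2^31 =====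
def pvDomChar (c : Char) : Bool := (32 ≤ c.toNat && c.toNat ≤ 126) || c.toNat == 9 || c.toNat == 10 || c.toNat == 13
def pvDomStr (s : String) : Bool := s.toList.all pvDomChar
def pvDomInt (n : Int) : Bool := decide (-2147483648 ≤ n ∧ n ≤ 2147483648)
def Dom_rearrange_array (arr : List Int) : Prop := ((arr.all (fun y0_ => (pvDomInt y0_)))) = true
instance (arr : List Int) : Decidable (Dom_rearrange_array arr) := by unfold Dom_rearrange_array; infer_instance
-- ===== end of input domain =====

-- B replaces A's two parity-indexed fill passes over a preallocated array by a partition of the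
-- sorted list into lows / reversed highs merged front-to-back in one pass (alternative decomposition,
-- same cost).  Both A and B sort the argument list in place in Python; the equivalence proved here is
-- about the RETURN value (the in-place sort mutation is identical in A and B).

-- ===== PORT A =====
def rearrange_array (arr : List Int) : List Int :=
  let n : Int := (arr.length : Int)
  let a := PySem.List.sorted arr id
  let result : List Int := List.replicate arr.length 0
  let st1 := (PySem.List.pyRange 0 n 2).foldl
    (fun (st : List Int × Int) i =>
      (PySem.List.pySetD st.1 i (PySem.List.pyGetD a st.2 0), st.2 + 1))
    (result, 0)
  let st2 := (PySem.List.pyRange 1 n 2).foldl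
    (fun (st : List Int × Int) i =>
      (PySem.List.pySetD st.1 i (PySem.List.pyGetD a (-st.2) 0), st.2 + 1))
    (st1.1, 1)
  st2.1

-- ===== PORT B =====
def rearrange_array_alt (arr : List Int) : List Int :=
  let a := PySem.List.sorted arr id
  let k : Int := PySem.Int.floordiv ((arr.length : Int) + 1) 2
  let lows := PySem.List.slice a none (some k)
  let highs := (PySem.List.slice? (PySem.List.slice a (some k) none) none none (-1)).getD []
  (PySem.List.pyRange 0 k 1).foldl
    (fun out i =>
      let out2 := out ++ [PySem.List.pyGetD lows i 0]
      if i < (highs.length : Int) then out2 ++ [PySem.List.pyGetD highs i 0] else out2)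
    []

-- ===== PRECONDITION & SPEC =====
def Spec_rearrange_array (arr : List Int) (out : List Int) : Prop := out = rearrange_array_alt arr
instance (arr : List Int) (out : List Int) : Decidable (Spec_rearrange_array arr out) := by unfold Spec_rearrange_array; infer_instance

-- ===== CLAIM (what is proved, stated in full; the proofs are below) =====
def Claim_equal_rearrange_array : Prop := ∀ (arr : List Int), Dom_rearrange_array arr → Spec_rearrange_array arr (rearrange_array arr)

-- ===== LEMMAS AND PROOFS =====

-- element j of the answer, as a total getD formula over the sorted list s
def pvF (s : List Int) (j : Nat) : Int :=
  if j % 2 = 0 then s.getD (j / 2) 0 else s.getD (s.length - (j + 1) / 2) 0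

def pvTarget (s : List Int) : List Int := (List.range s.length).map (pvF s)

-- full pairs: chunks of two cover an even range
theorem pv_pairs (k : Nat) (f : Nat → Int) :
    (List.range k).flatMap (fun i => [f (2 * i), f (2 * i + 1)]) = (List.range (2 * k)).map f := by
  induction k with
  | zero => simp
  | succ k ih =>
    have h2 : 2 * (k + 1) = (2 * k + 1) + 1 := by ring
    rw [List.range_succ, List.flatMap_append, ih, h2, List.range_succ, List.range_succ]
    simp

-- interleaving chunks cover a range of length n when k = ceil(n/2)
theorem pv_interleave (n k : Nat) (f : Nat → Int)
    (h : n = 2 * k ∨ (n + 1 = 2 * k)) :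
    (List.range k).flatMap (fun i => f (2 * i) :: (if 2 * i + 1 < n then [f (2 * i + 1)] else []))
      = (List.range n).map f := by
  rcases h with h | h
  · subst h
    rw [← pv_pairs]
    unfold List.flatMap
    apply congrArg
    apply List.map_congr_left
    intro i hi
    have : i < k := List.mem_range.mp hi
    have : 2 * i + 1 < 2 * k := by omega
    simp [this]
  · obtain ⟨m, rfl⟩ : ∃ m, k = m + 1 := ⟨k - 1, by omega⟩
    have hn : n = 2 * m + 1 := by omega
    subst hn
    rw [List.range_succ, List.flatMap_append]
    have hcongr : (List.range m).flatMap
        (fun i => f (2 * i) :: (if 2 * i + 1 < 2 * m + 1 then [f (2 * i + 1)] else []))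
        = (List.range (2 * m)).map f := by
      rw [← pv_pairs]
      unfold List.flatMap
      apply congrArg
      apply List.map_congr_left
      intro i hi
      have : i < m := List.mem_range.mp hi
      have : 2 * i + 1 < 2 * m + 1 := by omega
      simp [this]
    rw [hcongr, List.range_succ]
    simp

-- state of A's first loop after m steps
def pvRes1 (s : List Int) (m : Nat) : List Int :=
  (List.range s.length).map (fun j => if j % 2 = 0 ∧ j < 2 * m then s.getD (j / 2) 0 else 0)

theorem pv_loop1 (s : List Int) (m : Nat) :
    ((List.range m).map (fun j : Nat => ((2 * j : Nat) : Int))).foldl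
      (fun (st : List Int × Int) i =>
        (PySem.List.pySetD st.1 i (PySem.List.pyGetD s st.2 0), st.2 + 1))
      (List.replicate s.length 0, 0)
    = (pvRes1 s m, (m : Int)) := by
  induction m with
  | zero =>
    have h0 : pvRes1 s 0 = List.replicate s.length 0 := by
      apply List.ext_getElem <;> simp [pvRes1]
    simp [h0]
  | succ m ih =>
    rw [List.range_succ, List.map_append, List.foldl_append, ih]
    simp only [List.map_cons, List.map_nil, List.foldl_cons, List.foldl_nil]
    have hmain : PySem.List.pySetD (pvRes1 s m) ((2 * m : Nat) : Int)
        (PySem.List.pyGetD s ((m : Nat) : Int) 0) = pvRes1 s (m + 1) := by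
      rw [PySem.List.pySetD_natCast, PySem.List.pyGetD_natCast]
      apply List.ext_getElem
      · simp [pvRes1]
      · intro j h1 h2
        simp only [List.getElem_set, pvRes1, List.getElem_map, List.getElem_range]
        split_ifs <;> first | rfl | omega | (congr 1; omega)
    rw [hmain]
    simp only [Prod.mk.injEq]
    exact ⟨trivial, by push_cast; ring⟩

-- state of A's second loop after m steps (starting from the completed first loop)
def pvRes2 (s : List Int) (m : Nat) : List Int :=
  (List.range s.length).map (fun j =>
    if j % 2 = 1 ∧ j < 2 * m + 1 then s.getD (s.length - (j + 1) / 2) 0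
    else if j % 2 = 0 ∧ j < 2 * ((s.length + 1) / 2) then s.getD (j / 2) 0 else 0)

theorem pv_loop2 (s : List Int) (m : Nat) (hm : m ≤ s.length / 2) :
    ((List.range m).map (fun j : Nat => ((2 * j + 1 : Nat) : Int))).foldl
      (fun (st : List Int × Int) i =>
        (PySem.List.pySetD st.1 i (PySem.List.pyGetD s (-st.2) 0), st.2 + 1))
      (pvRes1 s ((s.length + 1) / 2), 1)
    = (pvRes2 s m, (m : Int) + 1) := by
  induction m with
  | zero =>
    have h0 : pvRes2 s 0 = pvRes1 s ((s.length + 1) / 2) := by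
      unfold pvRes2 pvRes1
      apply List.map_congr_left
      intro j hj
      split_ifs <;> first | rfl | omega
    simp [h0]
  | succ m ih =>
    have hm' : m ≤ s.length / 2 := by omega
    rw [List.range_succ, List.map_append, List.foldl_append, ih hm']
    simp only [List.map_cons, List.map_nil, List.foldl_cons, List.foldl_nil]
    have hk1 : 0 < m + 1 := by omega
    have hk2 : m + 1 ≤ s.length := by omega
    have hneg : -((m : Int) + 1) = -(((m + 1 : Nat) : Int)) := by push_cast; ring
    have hmain : PySem.List.pySetD (pvRes2 s m) ((2 * m + 1 : Nat) : Int)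
        (PySem.List.pyGetD s (-((m : Int) + 1)) 0) = pvRes2 s (m + 1) := by
      rw [hneg, PySem.List.pyGetD_neg_natCast s (m + 1) 0 hk1 hk2, PySem.List.pySetD_natCast]
      have hval : s[s.length - (m + 1)]'(by omega) = s.getD (s.length - (m + 1)) 0 := by
        rw [List.getD_eq_getElem?_getD, List.getElem?_eq_getElem (by omega)]
        rfl
      rw [hval]
      apply List.ext_getElem
      · simp [pvRes2]
      · intro j h1 h2
        simp only [List.getElem_set, pvRes2, List.getElem_map, List.getElem_range]
        split_ifs <;> first | rfl | omega | (congr 1; omega)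
    rw [hmain]
    simp only [Prod.mk.injEq]
    exact ⟨trivial, by push_cast; ring⟩

theorem pvRes2_target (s : List Int) : pvRes2 s (s.length / 2) = pvTarget s := by
  unfold pvRes2 pvTarget pvF
  apply List.map_congr_left
  intro j hj
  have hjn : j < s.length := List.mem_range.mp hj
  split_ifs <;> first | rfl | omega

-- A computes the target formula over the sorted list
theorem pvA_eq (arr : List Int) :
    rearrange_array arr = pvTarget (PySem.List.sorted arr id) := by
  have hlen : (PySem.List.sorted arr id false).length = arr.length :=
    PySem.List.length_sorted arr id false
  simp only [rearrange_array]
  rw [← hlen]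
  rw [PySem.List.pyRange_of_pos 0 ((PySem.List.sorted arr id false).length : Int)
        (by norm_num : (0:Int) < 2),
      PySem.List.pyRange_of_pos 1 ((PySem.List.sorted arr id false).length : Int)
        (by norm_num : (0:Int) < 2)]
  have hC1 : (if (0:Int) < ((PySem.List.sorted arr id false).length : Int) then
      ((((PySem.List.sorted arr id false).length : Int) - 0 + 2 - 1) / 2).toNat else 0)
      = ((PySem.List.sorted arr id false).length + 1) / 2 := by split <;> omega
  have hC2 : (if (1:Int) < ((PySem.List.sorted arr id false).length : Int) then
      ((((PySem.List.sorted arr id false).length : Int) - 1 + 2 - 1) / 2).toNat else 0)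
      = (PySem.List.sorted arr id false).length / 2 := by split <;> omega
  have hf1 : (fun k : Nat => (0:Int) + 2 * (k : Int)) = (fun j : Nat => ((2 * j : Nat) : Int)) := by
    funext j; push_cast; ring
  have hf2 : (fun k : Nat => (1:Int) + 2 * (k : Int)) = (fun j : Nat => ((2 * j + 1 : Nat) : Int)) := by
    funext j; push_cast; ring
  rw [hC1, hC2, hf1, hf2, pv_loop1, pv_loop2 _ _ (le_refl _), pvRes2_target]

-- B computes the same target formula over the sorted list
theorem pvB_eq (arr : List Int) :
    rearrange_array_alt arr = pvTarget (PySem.List.sorted arr id) := by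
  have hlen : (PySem.List.sorted arr id false).length = arr.length :=
    PySem.List.length_sorted arr id false
  simp only [rearrange_array_alt]
  rw [← hlen]
  have hk : PySem.Int.floordiv (((PySem.List.sorted arr id false).length : Int) + 1) 2
      = ((((PySem.List.sorted arr id false).length + 1) / 2 : Nat) : Int) := by
    simp [PySem.Int.floordiv, Int.fdiv_eq_ediv]
  rw [hk, PySem.List.slice_to_natCast, PySem.List.slice_from_natCast,
      PySem.List.slice?_none_none_neg_one, Option.getD_some]
  set s := PySem.List.sorted arr id false with hs
  set K : Nat := (s.length + 1) / 2 with hK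
  have hrange : PySem.List.pyRange 0 (K : Int) 1
      = (List.range K).map (fun j : Nat => (j : Int)) := by
    rw [PySem.List.pyRange_one]
    have : ((K : Int) - 0).toNat = K := by omega
    rw [this]
    apply List.map_congr_left
    intro j _
    ring
  rw [hrange]
  have hfun : (fun (out : List Int) (i : Int) =>
      let out2 := out ++ [PySem.List.pyGetD (s.take K) i 0];
      if i < (((s.drop K).reverse.length : Nat) : Int) then
        out2 ++ [PySem.List.pyGetD ((s.drop K).reverse) i 0] else out2)
      = (fun (out : List Int) (i : Int) => out ++
          (PySem.List.pyGetD (s.take K) i 0 ::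
            (if i < (((s.drop K).reverse.length : Nat) : Int) then
              [PySem.List.pyGetD ((s.drop K).reverse) i 0] else []))) := by
    funext out i
    show (if i < (((s.drop K).reverse.length : Nat) : Int) then
        (out ++ [PySem.List.pyGetD (s.take K) i 0]) ++ [PySem.List.pyGetD ((s.drop K).reverse) i 0]
      else out ++ [PySem.List.pyGetD (s.take K) i 0]) = _
    by_cases h : i < (((s.drop K).reverse.length : Nat) : Int)
    · rw [if_pos h, if_pos h]; simp
    · rw [if_neg h, if_neg h]
  rw [hfun, PySem.List.foldl_append_eq_flatMap, List.nil_append, List.flatMap_map]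
  have hchunk : ∀ i ∈ List.range K,
      (PySem.List.pyGetD (s.take K) ((i : Nat) : Int) 0 ::
        (if ((i : Nat) : Int) < (((s.drop K).reverse.length : Nat) : Int) then
          [PySem.List.pyGetD ((s.drop K).reverse) ((i : Nat) : Int) 0] else []))
      = (pvF s (2 * i) :: (if 2 * i + 1 < s.length then [pvF s (2 * i + 1)] else [])) := by
    intro i hi
    have hiK : i < K := List.mem_range.mp hi
    have hin : i < s.length := by omega
    have hlow : PySem.List.pyGetD (s.take K) ((i : Nat) : Int) 0 = pvF s (2 * i) := by
      rw [PySem.List.pyGetD_natCast, List.getD_eq_getElem?_getD, List.getElem?_take]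
      unfold pvF
      have h1 : 2 * i % 2 = 0 := by omega
      have h2 : 2 * i / 2 = i := by omega
      rw [if_pos hiK, h1, h2]
      simp [List.getD_eq_getElem?_getD]
    have hcond : (((i : Nat) : Int) < (((s.drop K).reverse.length : Nat) : Int))
        ↔ (2 * i + 1 < s.length) := by
      simp only [List.length_reverse, List.length_drop]
      omega
    rw [hlow]
    by_cases hc : 2 * i + 1 < s.length
    · rw [if_pos (hcond.mpr hc), if_pos hc]
      have hhigh : PySem.List.pyGetD ((s.drop K).reverse) ((i : Nat) : Int) 0
          = pvF s (2 * i + 1) := by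
        have hir : i < (s.drop K).reverse.length := by
          simp only [List.length_reverse, List.length_drop]; omega
        rw [PySem.List.pyGetD_natCast, List.getD_eq_getElem?_getD,
            List.getElem?_eq_getElem hir]
        unfold pvF
        have h1 : ¬ (2 * i + 1) % 2 = 0 := by omega
        rw [if_neg h1]
        have h2 : s.length - (2 * i + 1 + 1) / 2 = s.length - (i + 1) := by omega
        rw [h2]
        have h3 : s.length - (i + 1) < s.length := by omega
        rw [List.getD_eq_getElem?_getD, List.getElem?_eq_getElem h3]
        simp only [List.getElem_reverse, List.getElem_drop, Option.getD_some]
        congr 1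
        simp only [List.length_drop]
        omega
      rw [hhigh]
    · rw [if_neg (fun h => hc (hcond.mp h)), if_neg hc]
  have hflat : (List.range K).flatMap (fun i =>
      (PySem.List.pyGetD (s.take K) ((i : Nat) : Int) 0 ::
        (if ((i : Nat) : Int) < (((s.drop K).reverse.length : Nat) : Int) then
          [PySem.List.pyGetD ((s.drop K).reverse) ((i : Nat) : Int) 0] else [])))
      = (List.range K).flatMap (fun i =>
          (pvF s (2 * i) :: (if 2 * i + 1 < s.length then [pvF s (2 * i + 1)] else []))) := by
    unfold List.flatMap
    exact congrArg List.flatten (List.map_congr_left hchunk)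
  rw [hflat, pv_interleave s.length K (pvF s) (by omega)]
  rfl

-- ===== VERDICT (by name: the statement is the Claim_ definition above) =====
theorem rearrange_array_spec : Claim_equal_rearrange_array := by
  intro arr _
  unfold Spec_rearrange_array
  rw [pvA_eq, pvB_eq]
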